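-- pv_equiv track=rewrite | github.com/RIKEN-RCCS/mX_real | Ozaki-QW/gen_code.py | regs_rename
-- ===== SOURCE A (Python) =====
-- def concat ( list, element ) :
--     return '{} {}'.format( list, element )
--
-- def regs_rename( line ) :
--
--     NumRegs = 0
--     for i in range( len(line) ) :
--         if '!' in line[i] :
--             continue
--         a_list = line[i].split()
--         if len(a_list) < 2 :
--             continue
--         if not ( 'e' in line[i] ) :
--             continue
--
--         for j in range( 1, len(a_list) ) :
--             if not ( 'e' in a_list[j] ) :
--                 continue
--
--             t_reg = 't{}'.format( NumRegs )
--
--             flag = 0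
--             for k in range( i, len(line) ) :
--                 if '!' in line[k] :
--                     continue
--                 if not ( 'e' in line[k] ) :
--                     continue
--
--                 b_list = line[k].split()
--                 line[k] = ''
--                 for l in range( len(b_list) ) :
--                     if b_list[l] == a_list[j] :
--                         b_list[l] = t_reg
--                         flag = 1
--                     line[k] = concat( line[k], b_list[l] )
--             if flag == 1 :
--                 NumRegs = NumRegs + 1
--
--     return ( line, NumRegs )
-- ===== SOURCE B (Python) =====
-- def regs_rename(line):
--     # One pass with a dict mapping each distinct 'e'-token (first seen at
--     # position >= 1 of a qualifying line) to the next t{N}; each line is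
--     # rewritten once with the mapping known up to that line.
--     mapping = {}
--     n = 0
--     for i in range(len(line)):
--         s = line[i]
--         if '!' in s:
--             continue
--         toks = s.split()
--         if len(toks) >= 2 and any('e' in t and t not in mapping for t in toks):
--             for t in toks[1:]:
--                 if 'e' in t and t not in mapping:
--                     mapping[t] = 't{}'.format(n)
--                     n += 1
--         if mapping and 'e' in s:
--             line[i] = ''.join(' ' + mapping.get(t, t) for t in toks)
--     return (line, n)
-- ===== Notes on version B (the rewrite author's own statement) =====
-- stated objective: simpler
-- what changed: Replaces A's quadruple nested rename loops (for every e-token, rescan and rewrite the whole tail of lines) by a single pass that builds a dict mapping each distinct e-token to the next t-name and rewrites each line once with the mapping known so far.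
import Mathlib
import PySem

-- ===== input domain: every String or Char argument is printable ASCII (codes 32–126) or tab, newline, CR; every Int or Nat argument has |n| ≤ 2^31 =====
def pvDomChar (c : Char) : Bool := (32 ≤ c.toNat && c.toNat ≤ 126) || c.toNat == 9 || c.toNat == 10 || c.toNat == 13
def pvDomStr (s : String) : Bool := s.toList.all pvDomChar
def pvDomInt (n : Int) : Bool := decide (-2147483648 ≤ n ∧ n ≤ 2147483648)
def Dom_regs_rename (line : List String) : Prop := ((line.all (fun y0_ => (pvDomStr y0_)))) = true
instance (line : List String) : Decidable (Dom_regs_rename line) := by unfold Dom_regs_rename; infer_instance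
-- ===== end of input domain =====

-- B replaces A's quadruply nested rename loops by one pass with a dict of e-token -> t-name; objective: simpler.
-- Both the Python A and the Python B mutate `line` in place identically; the theorems here are about the return value.

-- ===== PORT A =====

-- concat(list, element) = '{} {}'.format(list, element)
def pvConcat (l e : String) : String := l ++ " " ++ e

-- A's innermost l-loop: rebuild line[k] from '' over b_list, substituting a_list[j]
def pvLLoop (aj treg : String) (bl : List String) (flag : Int) : String × Int :=
  bl.foldl (fun st b =>
    if b = aj then (pvConcat st.1 treg, 1) else (pvConcat st.1 b, st.2)) ("", flag)

-- A's k-loop: walk line[i:], rewriting each line that has no '!' and contains 'e'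
def pvKLoop (aj treg : String) : List String → Int → List String × Int
  | [], flag => ([], flag)
  | s :: rest, flag =>
    if PySem.Str.isIn "!" s then
      (s :: (pvKLoop aj treg rest flag).1, (pvKLoop aj treg rest flag).2)
    else if ! PySem.Str.isIn "e" s then
      (s :: (pvKLoop aj treg rest flag).1, (pvKLoop aj treg rest flag).2)
    else
      ((pvLLoop aj treg (PySem.Str.split₀ s) flag).1 ::
        (pvKLoop aj treg rest (pvLLoop aj treg (PySem.Str.split₀ s) flag).2).1,
       (pvKLoop aj treg rest (pvLLoop aj treg (PySem.Str.split₀ s) flag).2).2)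

-- A's j-loop over a_list[1:], threading (suffix of line starting at i, NumRegs)
def pvJLoop : List String → List String → Int → List String × Int
  | [], suf, n => (suf, n)
  | aj :: rest, suf, n =>
    if ! PySem.Str.isIn "e" aj then pvJLoop rest suf n
    else
      pvJLoop rest (pvKLoop aj ("t" ++ PySem.Int.toStr n) suf 0).1
        (if (pvKLoop aj ("t" ++ PySem.Int.toStr n) suf 0).2 = 1 then n + 1 else n)

theorem pvKLoop_length (aj treg : String) (xs : List String) (f : Int) :
    (pvKLoop aj treg xs f).1.length = xs.length := by
  induction xs generalizing f with
  | nil => rfl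
  | cons s rest ih => simp only [pvKLoop]; split_ifs <;> simp [ih]

theorem pvJLoop_length (ajs : List String) (suf : List String) (n : Int) :
    (pvJLoop ajs suf n).1.length = suf.length := by
  induction ajs generalizing suf n with
  | nil => rfl
  | cons aj rest ih =>
    simp only [pvJLoop]
    split_ifs
    · exact ih suf n
    all_goals rw [ih]; exact pvKLoop_length ..

-- A's i-loop: each step processes the head of the remaining suffix
def pvILoop : List String → Int → List String × Int
  | [], n => ([], n)
  | s :: rest, n =>
    match _h : (if PySem.Str.isIn "!" s then (s :: rest, n)
      else if (PySem.Str.split₀ s).length < 2 then (s :: rest, n)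
      else if ! PySem.Str.isIn "e" s then (s :: rest, n)
      else pvJLoop (PySem.Str.split₀ s).tail (s :: rest) n) with
    | (ns, n') =>
      match _h2 : ns with
      | [] => ([], n')
      | s' :: rest' => (s' :: (pvILoop rest' n').1, (pvILoop rest' n').2)
  termination_by xs => xs.length
  decreasing_by
    have hlen := congrArg (fun p => p.1.length) _h
    simp only at hlen
    split_ifs at hlen <;>
      first
        | (simp at hlen; simp [List.length_cons]; omega)
        | (rw [pvJLoop_length] at hlen; simp at hlen; simp [List.length_cons]; omega)

def regs_rename (line : List String) : List String × Int := pvILoop line 0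

-- ===== PORT B =====

-- B's per-line step: collect this line's fresh e-tokens into the dict (pvBColl),
-- then rewrite the line with the updated dict
def pvBColl (m : PySem.Dict String String) (n : Int) (s : String) :
    PySem.Dict String String × Int :=
  if 2 ≤ (PySem.Str.split₀ s).length ∧
      (PySem.Str.split₀ s).any (fun t => PySem.Str.isIn "e" t && ! m.contains t) then
    (PySem.Str.split₀ s).tail.foldl (fun (p : PySem.Dict String String × Int) t =>
      if PySem.Str.isIn "e" t && ! p.1.contains t then
        (p.1.insert t ("t" ++ PySem.Int.toStr p.2), p.2 + 1)
      else p) (m, n)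
  else (m, n)

def pvBLine (m : PySem.Dict String String) (n : Int) (s : String) :
    String × PySem.Dict String String × Int :=
  if PySem.Str.isIn "!" s then (s, m, n)
  else if (pvBColl m n s).1.size ≠ 0 ∧ PySem.Str.isIn "e" s then
    (((PySem.Str.split₀ s).map (fun t => " " ++ (pvBColl m n s).1.getD t t)).foldl (· ++ ·) "",
      pvBColl m n s)
  else (s, pvBColl m n s)

def regs_rename_alt (line : List String) : List String × Int :=
  let st := line.foldl
    (fun (st : List String × PySem.Dict String String × Int) s =>
      let r := pvBLine st.2.1 st.2.2 s
      (st.1 ++ [r.1], r.2))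
    ([], PySem.Dict.empty, 0)
  (st.1, st.2.2)

-- ===== PRECONDITION & SPEC =====
def Spec_regs_rename (line : List String) (out : List String × Int) : Prop := out = regs_rename_alt line
instance (line : List String) (out : List String × Int) : Decidable (Spec_regs_rename line out) := by unfold Spec_regs_rename; infer_instance

-- ===== CLAIM (what is proved, stated in full; the proofs are below) =====
def Claim_equal_regs_rename : Prop := ∀ (line : List String), Dom_regs_rename line → Spec_regs_rename line (regs_rename line)


-- ===== LEMMAS AND PROOFS =====

-- ---- proof-only vocabulary ----

-- tokens of a '!'-free line: nonempty, whitespace-free, '!'-free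
def pvGoodTok (t : String) : Prop :=
  t.toList ≠ [] ∧ ∀ c ∈ t.toList, PySem.Chars.isspace c = false ∧ c ≠ '!'

-- dict values (the t-names): additionally 'e'-free
def pvGoodVal (v : String) : Prop :=
  v.toList ≠ [] ∧ ∀ c ∈ v.toList, PySem.Chars.isspace c = false ∧ c ≠ '!' ∧ c ≠ 'e'

def pvGoodKey (k : String) : Prop := pvGoodTok k ∧ 'e' ∈ k.toList

def pvDInv (m : PySem.Dict String String) : Prop :=
  m.keys.Nodup ∧ (∀ k ∈ m.keys, pvGoodKey k) ∧ (∀ v ∈ m.values, pvGoodVal v)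

def pvRen (m : PySem.Dict String String) (t : String) : String := m.getD t t

def pvRender (ws : List String) : String := (ws.map (fun t => " " ++ t)).foldl (· ++ ·) ""

-- the state of a not-yet-reached line of A, as a function of B's dict
def pvT (m : PySem.Dict String String) (s : String) : String :=
  if PySem.Str.isIn "!" s then s
  else if m.size ≠ 0 ∧ PySem.Str.isIn "e" s then
    pvRender ((PySem.Str.split₀ s).map (pvRen m))
  else s

-- B's key-collection fold and per-line dict update
def pvCollect (ts : List String) (m : PySem.Dict String String) (n : Int) :
    PySem.Dict String String × Int :=
  ts.foldl (fun (p : PySem.Dict String String × Int) t =>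
    if PySem.Str.isIn "e" t && ! p.1.contains t then
      (p.1.insert t ("t" ++ PySem.Int.toStr p.2), p.2 + 1)
    else p) (m, n)

def pvNext (m : PySem.Dict String String) (s : String) : PySem.Dict String String :=
  if PySem.Str.isIn "!" s then m
  else if 2 ≤ (PySem.Str.split₀ s).length ∧
      (PySem.Str.split₀ s).any (fun t => PySem.Str.isIn "e" t && ! m.contains t) then
    (pvCollect (PySem.Str.split₀ s).tail m (m.size : Int)).1
  else m

def pvBStep (st : List String × PySem.Dict String String × Int) (s : String) :
    List String × PySem.Dict String String × Int :=
  let r := pvBLine st.2.1 st.2.2 s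
  (st.1 ++ [r.1], r.2)

-- ---- single-char membership ----

theorem pvIsIn_e (s : String) : PySem.Str.isIn "e" s = true ↔ 'e' ∈ s.toList := by
  rw [PySem.Str.isIn_iff_infix]
  exact List.singleton_infix_iff 'e' s.toList

theorem pvIsIn_bang (s : String) : PySem.Str.isIn "!" s = true ↔ '!' ∈ s.toList := by
  rw [PySem.Str.isIn_iff_infix]
  exact List.singleton_infix_iff '!' s.toList

-- ---- split₀ facts ----

theorem pvGo_nil (cur : List Char) (acc : List (List Char)) :
    PySem.Chars.split₀.go [] cur acc =
      if cur.isEmpty then acc.reverse else (cur.reverse :: acc).reverse := by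
  rw [PySem.Chars.split₀.go]

theorem pvGo_space {c : Char} (h : PySem.Chars.isspace c = true) (cs cur : List Char)
    (acc : List (List Char)) :
    PySem.Chars.split₀.go (c :: cs) cur acc =
      if cur.isEmpty then PySem.Chars.split₀.go cs [] acc
      else PySem.Chars.split₀.go cs [] (cur.reverse :: acc) := by
  rw [PySem.Chars.split₀.go]; simp [h]

theorem pvGo_char {c : Char} (h : PySem.Chars.isspace c = false) (cs cur : List Char)
    (acc : List (List Char)) :
    PySem.Chars.split₀.go (c :: cs) cur acc = PySem.Chars.split₀.go cs (c :: cur) acc := by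
  rw [PySem.Chars.split₀.go]; simp [h]

theorem pvGo_acc (cs : List Char) : ∀ cur acc,
    PySem.Chars.split₀.go cs cur acc = acc.reverse ++ PySem.Chars.split₀.go cs cur [] := by
  induction cs with
  | nil =>
    intro cur acc
    rw [pvGo_nil, pvGo_nil]
    by_cases h : cur.isEmpty <;> simp [h]
  | cons c cs ih =>
    intro cur acc
    by_cases hsp : PySem.Chars.isspace c
    · rw [pvGo_space hsp, pvGo_space hsp]
      by_cases h : cur.isEmpty
      · simp only [h, if_true]
        exact ih [] acc
      · simp only [h, if_false]
        rw [ih [] (cur.reverse :: acc), ih [] [cur.reverse]]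
        simp
    · rw [pvGo_char (by simpa using hsp), pvGo_char (by simpa using hsp)]
      exact ih (c :: cur) acc

theorem pvGo_words (cs : List Char) : ∀ cur acc w, (∀ c ∈ cur, PySem.Chars.isspace c = false) →
    w ∈ PySem.Chars.split₀.go cs cur acc →
    w ∈ acc ∨ (w ≠ [] ∧ ∀ c ∈ w, PySem.Chars.isspace c = false ∧ (c ∈ cur ∨ c ∈ cs)) := by
  induction cs with
  | nil =>
    intro cur acc w hcur hw
    rw [pvGo_nil] at hw
    by_cases h : cur.isEmpty
    · simp [h] at hw
      exact Or.inl hw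
    · simp [h] at hw
      rcases hw with hw | hw
      · exact Or.inl hw
      · refine Or.inr ⟨?_, ?_⟩
        · subst hw
          simpa [List.isEmpty_iff] using h
        · intro c hc
          subst hw
          simp only [List.mem_reverse] at hc
          exact ⟨hcur c hc, Or.inl hc⟩
  | cons c cs ih =>
    intro cur acc w hcur hw
    by_cases hsp : PySem.Chars.isspace c
    · rw [pvGo_space hsp] at hw
      by_cases h : cur.isEmpty
      · simp only [h, if_true] at hw
        rcases ih [] acc w (by simp) hw with h1 | ⟨h1, h2⟩
        · exact Or.inl h1
        · refine Or.inr ⟨h1, fun d hd => ⟨(h2 d hd).1, ?_⟩⟩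
          rcases (h2 d hd).2 with h3 | h3
          · simp at h3
          · exact Or.inr (List.mem_cons_of_mem _ h3)
      · simp only [h, if_false] at hw
        rcases ih [] (cur.reverse :: acc) w (by simp) hw with h1 | ⟨h1, h2⟩
        · rcases List.mem_cons.mp h1 with h1 | h1
          · refine Or.inr ⟨?_, ?_⟩
            · subst h1
              simpa [List.isEmpty_iff] using h
            · intro d hd
              subst h1
              simp only [List.mem_reverse] at hd
              exact ⟨hcur d hd, Or.inl hd⟩
          · exact Or.inl h1
        · refine Or.inr ⟨h1, fun d hd => ⟨(h2 d hd).1, ?_⟩⟩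
          rcases (h2 d hd).2 with h3 | h3
          · simp at h3
          · exact Or.inr (List.mem_cons_of_mem _ h3)
    · have hsp' : PySem.Chars.isspace c = false := by simpa using hsp
      rw [pvGo_char hsp'] at hw
      rcases ih (c :: cur) acc w (by
        intro d hd
        rcases List.mem_cons.mp hd with h1 | h1
        · subst h1; exact hsp'
        · exact hcur d h1) hw with h1 | ⟨h1, h2⟩
      · exact Or.inl h1
      · refine Or.inr ⟨h1, fun d hd => ⟨(h2 d hd).1, ?_⟩⟩
        rcases (h2 d hd).2 with h3 | h3
        · rcases List.mem_cons.mp h3 with h4 | h4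
          · subst h4; exact Or.inr (List.mem_cons_self)
          · exact Or.inl h4
        · exact Or.inr (List.mem_cons_of_mem _ h3)

theorem pvGo_mem_acc (cs : List Char) : ∀ cur acc w, w ∈ acc → w ∈ PySem.Chars.split₀.go cs cur acc := by
  induction cs with
  | nil =>
    intro cur acc w hw
    rw [pvGo_nil]
    by_cases h : cur.isEmpty <;> simp [h, hw]
  | cons c cs ih =>
    intro cur acc w hw
    by_cases hsp : PySem.Chars.isspace c
    · rw [pvGo_space hsp]
      by_cases h : cur.isEmpty
      · simp only [h, if_true]
        exact ih _ _ _ hw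
      · simp only [h, if_false]
        exact ih _ _ _ (List.mem_cons_of_mem _ hw)
    · rw [pvGo_char (by simpa using hsp)]
      exact ih _ _ _ hw

theorem pvGo_mem_cur (cs : List Char) : ∀ cur acc c, c ∈ cur →
    ∃ w ∈ PySem.Chars.split₀.go cs cur acc, c ∈ w := by
  induction cs with
  | nil =>
    intro cur acc c hc
    rw [pvGo_nil]
    have h : cur.isEmpty = false := by
      cases cur
      · simp at hc
      · rfl
    simp only [h, if_false]
    exact ⟨cur.reverse, by simp, by simpa using hc⟩
  | cons d cs ih =>
    intro cur acc c hc
    by_cases hsp : PySem.Chars.isspace d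
    · rw [pvGo_space hsp]
      have h : cur.isEmpty = false := by
        cases cur
        · simp at hc
        · rfl
      simp only [h, if_false]
      exact ⟨cur.reverse, pvGo_mem_acc _ _ _ _ (by simp), by simpa using hc⟩
    · rw [pvGo_char (by simpa using hsp)]
      exact ih _ _ _ (List.mem_cons_of_mem _ hc)

theorem pvGo_mem (cs : List Char) : ∀ cur acc c, PySem.Chars.isspace c = false → c ∈ cs →
    ∃ w ∈ PySem.Chars.split₀.go cs cur acc, c ∈ w := by
  induction cs with
  | nil => intro cur acc c _ hc; simp at hc
  | cons d cs ih =>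
    intro cur acc c hc hmem
    rcases List.mem_cons.mp hmem with h1 | h1
    · subst h1
      rw [pvGo_char hc]
      exact pvGo_mem_cur _ _ _ _ (List.mem_cons_self)
    · by_cases hsp : PySem.Chars.isspace d
      · rw [pvGo_space hsp]
        by_cases h : cur.isEmpty <;> simp only [h, if_true, if_false] <;> exact ih _ _ _ hc h1
      · rw [pvGo_char (by simpa using hsp)]
        exact ih _ _ _ hc h1

theorem pvGo_chunk (w : List Char) : ∀ cs cur acc, (∀ c ∈ w, PySem.Chars.isspace c = false) →
    PySem.Chars.split₀.go (w ++ cs) cur acc = PySem.Chars.split₀.go cs (w.reverse ++ cur) acc := by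
  induction w with
  | nil => intro cs cur acc _; simp
  | cons a w ih =>
    intro cs cur acc h
    have ha : PySem.Chars.isspace a = false := h a (List.mem_cons_self)
    rw [List.cons_append, pvGo_char ha, ih cs (a :: cur) acc (fun c hc => h c (List.mem_cons_of_mem _ hc))]
    simp

theorem pvSplit_flatten (ws : List (List Char))
    (h : ∀ w ∈ ws, w ≠ [] ∧ ∀ c ∈ w, PySem.Chars.isspace c = false) :
    PySem.Chars.split₀ ((ws.map (fun w => ' ' :: w)).flatten) = ws := by
  induction ws with
  | nil => rfl
  | cons w rest ih =>
    have hw := h w (List.mem_cons_self)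
    have hsp : PySem.Chars.isspace ' ' = true := by decide
    have hne : w.reverse.isEmpty = false := by
      simp [List.isEmpty_iff]
      exact hw.1
    show PySem.Chars.split₀.go _ [] [] = _
    rw [List.map_cons, List.flatten_cons, List.cons_append, pvGo_space hsp]
    simp only [List.isEmpty_nil, if_true]
    rw [pvGo_chunk w _ [] [] hw.2]
    have ihgo : PySem.Chars.split₀.go ((rest.map (fun w => ' ' :: w)).flatten) [] [] = rest :=
      ih (fun w hw => h w (List.mem_cons_of_mem _ hw))
    cases rest with
    | nil =>
      simp only [List.map_nil, List.flatten_nil, List.append_nil]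
      rw [pvGo_nil]
      simp [hne]
    | cons w2 rest2 =>
      rw [List.map_cons, List.flatten_cons, List.cons_append, pvGo_space hsp]
      simp only [hne, Bool.false_eq_true, if_false, List.reverse_reverse, List.append_nil]
      rw [pvGo_acc _ [] [w]]
      rw [List.map_cons, List.flatten_cons, List.cons_append, pvGo_space hsp] at ihgo
      simp only [List.isEmpty_nil, if_true] at ihgo
      simp [ihgo]

-- string-level corollaries

theorem pvTok_spec {t s : String} (h : t ∈ PySem.Str.split₀ s) :
    t.toList ≠ [] ∧ ∀ c ∈ t.toList, PySem.Chars.isspace c = false ∧ c ∈ s.toList := by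
  have hmem : t.toList ∈ PySem.Chars.split₀ s.toList := by
    rw [← PySem.Str.split₀_map_toList]
    exact List.mem_map_of_mem h
  have := pvGo_words s.toList [] [] t.toList (by simp) hmem
  rcases this with h1 | ⟨h1, h2⟩
  · simp at h1
  · refine ⟨h1, fun c hc => ⟨(h2 c hc).1, ?_⟩⟩
    rcases (h2 c hc).2 with h3 | h3
    · simp at h3
    · exact h3

theorem pvExists_tok {c : Char} {s : String} (hc : PySem.Chars.isspace c = false)
    (h : c ∈ s.toList) : ∃ t ∈ PySem.Str.split₀ s, c ∈ t.toList := by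
  obtain ⟨w, hw, hcw⟩ := pvGo_mem s.toList [] [] c hc h
  have hw' : w ∈ (PySem.Str.split₀ s).map String.toList := by
    rw [PySem.Str.split₀_map_toList]; exact hw
  obtain ⟨t, ht, rfl⟩ := List.mem_map.mp hw'
  exact ⟨t, ht, hcw⟩

theorem pvRenderAux (ws : List String) : ∀ a : String,
    ((ws.map (fun t => " " ++ t)).foldl (· ++ ·) a).toList
      = a.toList ++ (ws.map (fun w => ' ' :: w.toList)).flatten := by
  induction ws with
  | nil => intro a; simp
  | cons w ws ih =>
    intro a
    simp only [List.map_cons, List.foldl_cons, List.flatten_cons]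
    rw [ih (a ++ (" " ++ w))]
    simp [String.toList_append]

theorem pvRender_toList (ws : List String) :
    (pvRender ws).toList = (ws.map (fun w => ' ' :: w.toList)).flatten := by
  unfold pvRender
  rw [pvRenderAux]
  simp

theorem pvMem_render {c : Char} (hc : c ≠ ' ') (ws : List String) :
    c ∈ (pvRender ws).toList ↔ ∃ w ∈ ws, c ∈ w.toList := by
  rw [pvRender_toList]
  simp only [List.mem_flatten, List.mem_map]
  constructor
  · rintro ⟨l, ⟨w, hw, rfl⟩, hcl⟩
    rcases List.mem_cons.mp hcl with h1 | h1
    · exact absurd h1 hc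
    · exact ⟨w, hw, h1⟩
  · rintro ⟨w, hw, hcw⟩
    exact ⟨' ' :: w.toList, ⟨w, hw, rfl⟩, List.mem_cons_of_mem _ hcw⟩

theorem pvSplit_render (ws : List String)
    (h : ∀ w ∈ ws, w.toList ≠ [] ∧ ∀ c ∈ w.toList, PySem.Chars.isspace c = false) :
    PySem.Str.split₀ (pvRender ws) = ws := by
  have hinj : Function.Injective String.toList := fun a b hab => String.toList_inj.mp hab
  apply List.map_injective_iff.mpr hinj
  rw [PySem.Str.split₀_map_toList, pvRender_toList]
  have : (ws.map (fun w => ' ' :: w.toList)) = ((ws.map String.toList).map (fun w => ' ' :: w)) := by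
    simp [List.map_map]
  rw [this]
  apply pvSplit_flatten
  intro w hw
  obtain ⟨t, ht, rfl⟩ := List.mem_map.mp hw
  exact h t ht

-- ---- dict facts ----

theorem pvContains_false {m : PySem.Dict String String} {t : String} (h : t ∉ m.keys) :
    m.contains t = false := by
  rcases Bool.eq_false_or_eq_true (m.contains t) with h1 | h1
  · exact absurd ((PySem.Dict.contains_iff_mem_keys m t).mp h1) h
  · exact h1

theorem pvRen_of_not_mem {m : PySem.Dict String String} {t : String} (h : t ∉ m.keys) :
    pvRen m t = t := PySem.Dict.getD_of_not_contains m t (pvContains_false h)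

theorem pvRen_mem_values {m : PySem.Dict String String} {t : String} (h : t ∈ m.keys) :
    pvRen m t ∈ m.values := by
  have hc : m.contains t = true := (PySem.Dict.contains_iff_mem_keys m t).mpr h
  rw [PySem.Dict.contains_eq_isSome_get?] at hc
  obtain ⟨v, hv⟩ := Option.isSome_iff_exists.mp hc
  have hval : v ∈ m.values := by
    have := PySem.Dict.mem_items_of_get?_eq_some m hv
    simp only [PySem.Dict.values]
    exact List.mem_map.mpr ⟨(t, v), this, rfl⟩
  have : pvRen m t = v := by
    unfold pvRen
    rw [PySem.Dict.getD_eq_get?_getD, hv]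
    rfl
  rw [this]
  exact hval

theorem pvRen_good {m : PySem.Dict String String} {t : String} (hm : pvDInv m)
    (ht : pvGoodTok t) : pvGoodTok (pvRen m t) ∧ ('e' ∈ (pvRen m t).toList ↔ 'e' ∈ t.toList ∧ t ∉ m.keys) := by
  by_cases h : t ∈ m.keys
  · have hv := pvRen_mem_values h
    have hgv := hm.2.2 _ hv
    refine ⟨⟨hgv.1, fun c hc => ⟨(hgv.2 c hc).1, (hgv.2 c hc).2.1⟩⟩, ?_⟩
    simp only [h, not_true, and_false, iff_false]
    intro he
    exact (hgv.2 _ he).2.2 rfl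
  · rw [pvRen_of_not_mem h]
    exact ⟨ht, by simp [h]⟩

theorem pvRen_eq_key_iff {m : PySem.Dict String String} {t aj : String} (hm : pvDInv m)
    (haj : pvGoodKey aj) : pvRen m t = aj ↔ t = aj ∧ aj ∉ m.keys := by
  by_cases h : t ∈ m.keys
  · have hv := pvRen_mem_values h
    have hgv := hm.2.2 _ hv
    constructor
    · intro he
      exfalso
      rw [he] at hgv
      exact (hgv.2 _ haj.2).2.2 rfl
    · rintro ⟨rfl, hnk⟩
      exact absurd h hnk
  · rw [pvRen_of_not_mem h]
    constructor
    · rintro rfl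
      exact ⟨rfl, h⟩
    · rintro ⟨rfl, _⟩
      rfl

theorem pvSize_ne_zero_iff (m : PySem.Dict String String) : m.size ≠ 0 ↔ m.keys ≠ [] := by
  constructor
  · intro h hk
    apply h
    have : m.items = [] := by
      have := congrArg List.length hk
      simp only [PySem.Dict.keys, List.length_map] at this
      exact List.length_eq_zero_iff.mp this
    simp [PySem.Dict.size, this]
  · intro h hs
    apply h
    have : m.items = [] := List.length_eq_zero_iff.mp hs
    simp [PySem.Dict.keys, this]

theorem pvDigitChar_good (k : Nat) (h : k < 10) :
    PySem.Chars.isspace (Nat.digitChar k) = false ∧ Nat.digitChar k ≠ '!' ∧ Nat.digitChar k ≠ 'e' := by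
  interval_cases k <;> decide

theorem pvDigitsCore_good (fuel : Nat) : ∀ (k : Nat) (ds : List Char),
    (∀ c ∈ ds, PySem.Chars.isspace c = false ∧ c ≠ '!' ∧ c ≠ 'e') →
    ∀ c ∈ Nat.toDigitsCore 10 fuel k ds, PySem.Chars.isspace c = false ∧ c ≠ '!' ∧ c ≠ 'e' := by
  induction fuel with
  | zero => intro k ds hds; rw [Nat.toDigitsCore]; exact hds
  | succ fuel ih =>
    intro k ds hds c hc
    rw [Nat.toDigitsCore] at hc
    have hmod : k % 10 < 10 := Nat.mod_lt _ (by omega)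
    have hd := pvDigitChar_good _ hmod
    by_cases h : k / 10 = 0
    · simp only [h, if_true] at hc
      rcases List.mem_cons.mp hc with h1 | h1
      · subst h1; exact hd
      · exact hds c h1
    · simp only [h, if_false] at hc
      refine ih (k / 10) _ ?_ c hc
      intro d hd2
      rcases List.mem_cons.mp hd2 with h1 | h1
      · subst h1; exact hd
      · exact hds d h1

theorem pvGoodVal_treg (n : Int) (hn : 0 ≤ n) : pvGoodVal ("t" ++ PySem.Int.toStr n) := by
  have htl : ("t" ++ PySem.Int.toStr n).toList = 't' :: PySem.Int.toChars n := by
    rw [String.toList_append]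
    unfold PySem.Int.toStr
    rw [String.toList_ofList]
    simp
  constructor
  · rw [htl]; simp
  · rw [htl]
    intro c hc
    rcases List.mem_cons.mp hc with h1 | h1
    · subst h1; decide
    · unfold PySem.Int.toChars at h1
      rw [if_neg (by omega)] at h1
      unfold Nat.toDigits at h1
      exact pvDigitsCore_good _ _ _ (by simp) c h1

-- ---- the per-line state transform ----

theorem pvT_of_bang {m : PySem.Dict String String} {s : String} (h : '!' ∈ s.toList) :
    pvT m s = s := by
  unfold pvT
  rw [if_pos ((pvIsIn_bang s).mpr h)]

-- each token of a '!'-free line is a good token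
theorem pvTok_good {t s : String} (h : '!' ∉ s.toList) (ht : t ∈ PySem.Str.split₀ s) :
    pvGoodTok t := by
  obtain ⟨h1, h2⟩ := pvTok_spec ht
  refine ⟨h1, fun c hc => ⟨(h2 c hc).1, fun hb => ?_⟩⟩
  exact h (hb ▸ (h2 c hc).2)

theorem pvSplit_T {m : PySem.Dict String String} {s : String} (hm : pvDInv m)
    (h : '!' ∉ s.toList) :
    PySem.Str.split₀ (pvT m s) = (PySem.Str.split₀ s).map (pvRen m) := by
  unfold pvT
  rw [if_neg (fun hc => h ((pvIsIn_bang s).mp hc))]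
  by_cases hq : m.size ≠ 0 ∧ PySem.Str.isIn "e" s = true
  · rw [if_pos hq]
    apply pvSplit_render
    intro w hw
    obtain ⟨t, ht, rfl⟩ := List.mem_map.mp hw
    have hg := (pvRen_good hm (pvTok_good h ht)).1
    exact ⟨hg.1, fun c hc => (hg.2 c hc).1⟩
  · rw [if_neg hq]
    have hren : ∀ t ∈ PySem.Str.split₀ s, pvRen m t = t := by
      intro t ht
      apply pvRen_of_not_mem
      intro hk
      rcases Decidable.not_and_iff_not_or_not.mp hq with h1 | h1
      · have : m.keys = [] := by
          by_contra hne
          exact h1 ((pvSize_ne_zero_iff m).mpr hne)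
        simp [this] at hk
      · have he : 'e' ∈ t.toList := (hm.2.1 t hk).2
        have : 'e' ∈ s.toList := ((pvTok_spec ht).2 'e' he).2
        exact h1 ((pvIsIn_e s).mpr this)
    calc (PySem.Str.split₀ s) = (PySem.Str.split₀ s).map id := by rw [List.map_id]
    _ = (PySem.Str.split₀ s).map (pvRen m) := (List.map_congr_left (fun t ht => (hren t ht).symm))

theorem pvBang_T {m : PySem.Dict String String} {s : String} (hm : pvDInv m)
    (h : '!' ∉ s.toList) : '!' ∉ (pvT m s).toList := by
  unfold pvT
  rw [if_neg (fun hc => h ((pvIsIn_bang s).mp hc))]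
  by_cases hq : m.size ≠ 0 ∧ PySem.Str.isIn "e" s = true
  · rw [if_pos hq]
    intro hmem
    obtain ⟨w, hw, hcw⟩ := (pvMem_render (by decide) _).mp hmem
    obtain ⟨t, ht, rfl⟩ := List.mem_map.mp hw
    have hg := (pvRen_good hm (pvTok_good h ht)).1
    exact (hg.2 _ hcw).2 rfl
  · rw [if_neg hq]
    exact h

theorem pvE_T {m : PySem.Dict String String} {s : String} (hm : pvDInv m)
    (h : '!' ∉ s.toList) :
    ('e' ∈ (pvT m s).toList ↔ ∃ t ∈ PySem.Str.split₀ s, 'e' ∈ t.toList ∧ t ∉ m.keys) := by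
  unfold pvT
  rw [if_neg (fun hc => h ((pvIsIn_bang s).mp hc))]
  by_cases hq : m.size ≠ 0 ∧ PySem.Str.isIn "e" s = true
  · rw [if_pos hq]
    rw [pvMem_render (by decide)]
    constructor
    · rintro ⟨w, hw, hcw⟩
      obtain ⟨t, ht, rfl⟩ := List.mem_map.mp hw
      have := (pvRen_good hm (pvTok_good h ht)).2.mp hcw
      exact ⟨t, ht, this⟩
    · rintro ⟨t, ht, he, hk⟩
      refine ⟨pvRen m t, List.mem_map_of_mem ht, ?_⟩
      rw [pvRen_of_not_mem hk]
      exact he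
  · rw [if_neg hq]
    rcases Decidable.not_and_iff_not_or_not.mp hq with h1 | h1
    · have hkeys : m.keys = [] := by
        by_contra hne
        exact h1 ((pvSize_ne_zero_iff m).mpr hne)
      simp only [hkeys, List.not_mem_nil, not_false_iff, and_true]
      constructor
      · intro he
        exact pvExists_tok (by decide) he
      · rintro ⟨t, ht, he⟩
        exact ((pvTok_spec ht).2 'e' he).2
    · have hens : 'e' ∉ s.toList := fun he => h1 ((pvIsIn_e s).mpr he)
      constructor
      · intro he; exact absurd he hens
      · rintro ⟨t, ht, he, _⟩
        exact absurd ((pvTok_spec ht).2 'e' he).2 hens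

theorem pvT_congr {m m' : PySem.Dict String String} {s : String}
    (hsz : 'e' ∈ s.toList → (m.size = 0 ↔ m'.size = 0))
    (h : ∀ t ∈ PySem.Str.split₀ s, pvRen m t = pvRen m' t) : pvT m s = pvT m' s := by
  unfold pvT
  by_cases hb : PySem.Str.isIn "!" s = true
  · rw [if_pos hb, if_pos hb]
  · rw [if_neg hb, if_neg hb]
    by_cases he : PySem.Str.isIn "e" s = true
    · have hiff := hsz ((pvIsIn_e s).mp he)
      by_cases h0 : m.size ≠ 0
      · rw [if_pos ⟨h0, he⟩, if_pos ⟨fun hz => h0 (hiff.mpr hz), he⟩]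
        rw [List.map_congr_left h]
      · rw [if_neg (fun hc => h0 hc.1), if_neg (fun hc => hc.1 (hiff.mp (not_not.mp h0)))]
    · rw [if_neg (fun hc => he hc.2), if_neg (fun hc => he hc.2)]

-- ---- loop characterizations ----

theorem pvLLoopAux (aj treg : String) (bl : List String) : ∀ (acc : String) (f : Int),
    bl.foldl (fun st b => if b = aj then (pvConcat st.1 treg, 1) else (pvConcat st.1 b, st.2)) (acc, f)
      = (acc ++ pvRender (bl.map (fun b => if b = aj then treg else b)), if aj ∈ bl then 1 else f) := by
  induction bl with
  | nil =>
    intro acc f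
    simp only [List.foldl_nil, List.map_nil, List.not_mem_nil, if_false]
    refine Prod.ext_iff.mpr ⟨?_, rfl⟩
    apply String.toList_inj.mp
    simp [pvRender_toList]
  | cons b bl ih =>
    intro acc f
    simp only [List.foldl_cons, List.map_cons]
    by_cases hb : b = aj
    · rw [if_pos hb, if_pos hb, ih]
      refine Prod.ext_iff.mpr ⟨?_, ?_⟩
      · apply String.toList_inj.mp
        simp [pvRender_toList, pvConcat, String.toList_append]
      · simp [hb]
    · rw [if_neg hb, if_neg hb, ih]
      refine Prod.ext_iff.mpr ⟨?_, ?_⟩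
      · apply String.toList_inj.mp
        simp [pvRender_toList, pvConcat, String.toList_append]
      · simp only [List.mem_cons]
        have : ¬ aj = b := fun hh => hb hh.symm
        simp [this]

theorem pvLLoop_eq (aj treg : String) (bl : List String) (f : Int) :
    pvLLoop aj treg bl f =
      (pvRender (bl.map (fun b => if b = aj then treg else b)), if aj ∈ bl then 1 else f) := by
  unfold pvLLoop
  rw [pvLLoopAux]
  refine Prod.ext_iff.mpr ⟨?_, rfl⟩
  apply String.toList_inj.mp
  simp [String.toList_append]

theorem pvIsIn_e_false {s : String} (h : 'e' ∉ s.toList) : PySem.Str.isIn "e" s = false := by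
  rcases Bool.eq_false_or_eq_true (PySem.Str.isIn "e" s) with h1 | h1
  · exact absurd ((pvIsIn_e s).mp h1) h
  · exact h1

theorem pvRen_insert {m : PySem.Dict String String} {aj treg : String} (hm : pvDInv m)
    (haj : pvGoodKey aj) (hfresh : aj ∉ m.keys) (t : String) :
    (if pvRen m t = aj then treg else pvRen m t) = pvRen (m.insert aj treg) t := by
  by_cases hta : t = aj
  · subst hta
    rw [if_pos (pvRen_of_not_mem hfresh)]
    unfold pvRen
    rw [PySem.Dict.getD_insert]
    simp
  · rw [if_neg (fun hc => hta ((pvRen_eq_key_iff hm haj).mp hc).1)]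
    unfold pvRen
    rw [PySem.Dict.getD_insert, if_neg hta]

theorem pvMem_map_ren {m : PySem.Dict String String} {aj : String} (hm : pvDInv m)
    (haj : pvGoodKey aj) (hfresh : aj ∉ m.keys) (l : List String) :
    aj ∈ l.map (pvRen m) ↔ aj ∈ l := by
  rw [List.mem_map]
  constructor
  · rintro ⟨t, ht, he⟩
    rw [((pvRen_eq_key_iff hm haj).mp he).1] at ht
    exact ht
  · intro h
    exact ⟨aj, h, pvRen_of_not_mem hfresh⟩

theorem pvNotMem_map_ren {m : PySem.Dict String String} {aj : String} (hm : pvDInv m)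
    (haj : pvGoodKey aj) (hstale : aj ∈ m.keys) (l : List String) :
    aj ∉ l.map (pvRen m) := by
  rw [List.mem_map]
  rintro ⟨t, _, he⟩
  exact ((pvRen_eq_key_iff hm haj).mp he).2 hstale

theorem pvT_render_eq {m : PySem.Dict String String} {x : String} (hbx : '!' ∉ x.toList)
    (hsz : m.size ≠ 0) (hex : 'e' ∈ x.toList) :
    pvT m x = pvRender ((PySem.Str.split₀ x).map (pvRen m)) := by
  unfold pvT
  rw [if_neg (fun hc => hbx ((pvIsIn_bang x).mp hc)), if_pos ⟨hsz, (pvIsIn_e x).mpr hex⟩]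

theorem pvInsert_size_ne_zero (m : PySem.Dict String String) (aj treg : String) :
    (m.insert aj treg).size ≠ 0 := by
  rw [PySem.Dict.size_insert]
  by_cases h : m.contains aj = true
  · rw [if_pos h]
    have hmem : aj ∈ m.keys := (PySem.Dict.contains_iff_mem_keys m aj).mp h
    exact (pvSize_ne_zero_iff m).mpr (List.ne_nil_of_mem hmem)
  · rw [if_neg h]
    omega

theorem pvKLoop_fresh (aj treg : String) (xs : List String) (m : PySem.Dict String String)
    (hm : pvDInv m) (haj : pvGoodKey aj) (hfresh : aj ∉ m.keys) (hv : pvGoodVal treg) :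
    ∀ f : Int, pvKLoop aj treg (xs.map (pvT m)) f =
      (xs.map (pvT (m.insert aj treg)),
       if ∃ x ∈ xs, '!' ∉ x.toList ∧ aj ∈ PySem.Str.split₀ x then 1 else f) := by
  induction xs with
  | nil => intro f; simp [pvKLoop]
  | cons x xs ih =>
    intro f
    simp only [List.map_cons]
    by_cases hbx : '!' ∈ x.toList
    · rw [pvT_of_bang hbx]
      show pvKLoop aj treg (x :: xs.map (pvT m)) f = _
      unfold pvKLoop
      rw [if_pos ((pvIsIn_bang x).mpr hbx)]
      rw [ih f]
      rw [pvT_of_bang (m := m.insert aj treg) hbx]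
      dsimp only
      refine Prod.ext_iff.mpr ⟨rfl, ?_⟩
      have : ¬ ('!' ∉ x.toList ∧ aj ∈ PySem.Str.split₀ x) := fun hc => hc.1 hbx
      simp only [List.exists_mem_cons_iff, this, false_or]
    · have hbT : ¬ (PySem.Str.isIn "!" (pvT m x) = true) :=
        fun hc => (pvBang_T hm hbx) ((pvIsIn_bang _).mp hc)
      unfold pvKLoop
      rw [if_neg hbT]
      by_cases heT : 'e' ∈ (pvT m x).toList
      · rw [if_neg (by rw [(pvIsIn_e (pvT m x)).mpr heT]; decide)]
        rw [pvSplit_T hm hbx, pvLLoop_eq]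
        obtain ⟨t0, ht0, he0, hk0⟩ := (pvE_T hm hbx).mp heT
        have hex : 'e' ∈ x.toList := ((pvTok_spec ht0).2 'e' he0).2
        have hmaps : ((PySem.Str.split₀ x).map (pvRen m)).map (fun b => if b = aj then treg else b)
            = (PySem.Str.split₀ x).map (pvRen (m.insert aj treg)) := by
          rw [List.map_map]
          apply List.map_congr_left
          intro t _
          simp only [Function.comp_apply]
          exact pvRen_insert hm haj hfresh t
        have hhead : pvRender (((PySem.Str.split₀ x).map (pvRen m)).map (fun b => if b = aj then treg else b))
            = pvT (m.insert aj treg) x := by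
          rw [hmaps, pvT_render_eq hbx (pvInsert_size_ne_zero m aj treg) hex]
        have hflag : (aj ∈ (PySem.Str.split₀ x).map (pvRen m)) ↔ aj ∈ PySem.Str.split₀ x :=
          pvMem_map_ren hm haj hfresh _
        rw [ih _]
        dsimp only
        refine Prod.ext_iff.mpr ⟨by rw [hhead], ?_⟩
        simp only [List.exists_mem_cons_iff]
        by_cases hocc : aj ∈ PySem.Str.split₀ x
        · simp [hflag.mpr hocc, hbx, hocc]
        · have : ¬ aj ∈ (PySem.Str.split₀ x).map (pvRen m) := fun hc => hocc (hflag.mp hc)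
          simp only [this, if_false]
          have : ¬ ('!' ∉ x.toList ∧ aj ∈ PySem.Str.split₀ x) := fun hc => hocc hc.2
          simp [this]
      · rw [if_pos (by rw [pvIsIn_e_false heT]; decide)]
        have hocc : aj ∉ PySem.Str.split₀ x := by
          intro hc
          exact heT ((pvE_T hm hbx).mpr ⟨aj, hc, haj.2, hfresh⟩)
        have hTeq : pvT (m.insert aj treg) x = pvT m x := by
          apply Eq.symm
          apply pvT_congr
          · intro hex
            obtain ⟨t0, ht0, he0⟩ := pvExists_tok (by decide) hex
            have hk0 : t0 ∈ m.keys := by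
              by_contra hk
              exact heT ((pvE_T hm hbx).mpr ⟨t0, ht0, he0, hk⟩)
            constructor
            · intro h0
              exact absurd h0 ((pvSize_ne_zero_iff m).mpr (List.ne_nil_of_mem hk0))
            · intro h0
              exact absurd h0 (pvInsert_size_ne_zero m aj treg)
          · intro t ht
            rw [← pvRen_insert hm haj hfresh t]
            have : ¬ (pvRen m t = aj) := by
              intro hc
              obtain ⟨rfl, _⟩ := (pvRen_eq_key_iff hm haj).mp hc
              exact hocc ht
            rw [if_neg this]
        rw [ih f, hTeq]
        dsimp only
        refine Prod.ext_iff.mpr ⟨rfl, ?_⟩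
        simp only [List.exists_mem_cons_iff]
        have : ¬ ('!' ∉ x.toList ∧ aj ∈ PySem.Str.split₀ x) := fun hc => hocc hc.2
        simp [this]

theorem pvKLoop_stale (aj treg : String) (xs : List String) (m : PySem.Dict String String)
    (hm : pvDInv m) (haj : pvGoodKey aj) (hstale : aj ∈ m.keys) :
    ∀ f : Int, pvKLoop aj treg (xs.map (pvT m)) f = (xs.map (pvT m), f) := by
  induction xs with
  | nil => intro f; simp [pvKLoop]
  | cons x xs ih =>
    intro f
    simp only [List.map_cons]
    by_cases hbx : '!' ∈ x.toList
    · rw [pvT_of_bang hbx]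
      unfold pvKLoop
      rw [if_pos ((pvIsIn_bang x).mpr hbx)]
      rw [ih f]
    · have hbT : ¬ (PySem.Str.isIn "!" (pvT m x) = true) :=
        fun hc => (pvBang_T hm hbx) ((pvIsIn_bang _).mp hc)
      unfold pvKLoop
      rw [if_neg hbT]
      by_cases heT : 'e' ∈ (pvT m x).toList
      · rw [if_neg (by rw [(pvIsIn_e (pvT m x)).mpr heT]; decide)]
        rw [pvSplit_T hm hbx, pvLLoop_eq]
        have hnm : aj ∉ (PySem.Str.split₀ x).map (pvRen m) := pvNotMem_map_ren hm haj hstale _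
        have hid : ((PySem.Str.split₀ x).map (pvRen m)).map (fun b => if b = aj then treg else b)
            = (PySem.Str.split₀ x).map (pvRen m) := by
          apply List.map_congr_left ?_ |>.trans (List.map_id _)
          intro b hb
          rw [if_neg (fun hc => hnm (by rw [← hc]; exact hb))]
          rfl
        obtain ⟨t0, ht0, he0, hk0⟩ := (pvE_T hm hbx).mp heT
        have hex : 'e' ∈ x.toList := ((pvTok_spec ht0).2 'e' he0).2
        have hsz : m.size ≠ 0 := (pvSize_ne_zero_iff m).mpr (List.ne_nil_of_mem hstale)
        have hhead : pvRender (((PySem.Str.split₀ x).map (pvRen m)).map (fun b => if b = aj then treg else b))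
            = pvT m x := by
          rw [hid, ← pvT_render_eq hbx hsz hex]
        dsimp only
        rw [if_neg hnm, ih f]
        exact Prod.ext_iff.mpr ⟨by rw [hhead], rfl⟩
      · rw [if_pos (by rw [pvIsIn_e_false heT]; decide)]
        rw [ih f]

theorem pvCollect_snd_aux (ts : List String) : ∀ (m : PySem.Dict String String) (n : Int),
    n = (m.size : Int) → (pvCollect ts m n).2 = ((pvCollect ts m n).1.size : Int) := by
  induction ts with
  | nil => intro m n h; simpa [pvCollect] using h
  | cons t ts ih =>
    intro m n h
    unfold pvCollect
    simp only [List.foldl_cons]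
    by_cases hc : (PySem.Str.isIn "e" t && ! m.contains t) = true
    · rw [if_pos hc]
      have hcont : m.contains t = false := by
        rcases Bool.and_eq_true_iff.mp hc with ⟨_, h2⟩
        exact by simpa using h2
      exact ih (m.insert t ("t" ++ PySem.Int.toStr n)) (n + 1)
        (by rw [PySem.Dict.size_insert, if_neg (by simp [hcont])]; push_cast; omega)
    · rw [if_neg hc]
      exact ih m n h

theorem pvCollect_snd (ts : List String) : ∀ m : PySem.Dict String String,
    (pvCollect ts m (m.size : Int)).2 = ((pvCollect ts m (m.size : Int)).1.size : Int) :=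
  fun m => pvCollect_snd_aux ts m _ rfl

theorem pvDInv_insert {m : PySem.Dict String String} {t v : String} (hm : pvDInv m)
    (ht : pvGoodKey t) (hfresh : m.contains t = false) (hv : pvGoodVal v) :
    pvDInv (m.insert t v) := by
  refine ⟨PySem.Dict.nodup_keys_insert _ _ _ hm.1, ?_, ?_⟩
  · intro k hk
    rcases (PySem.Dict.mem_keys_insert _ _ _ _).mp hk with h1 | h1
    · subst h1; exact ht
    · exact hm.2.1 k h1
  · intro v' hv'
    have hit : (m.insert t v).items = m.items ++ [(t, v)] :=
      PySem.Dict.items_insert_of_not_contains m v hfresh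
    simp only [PySem.Dict.values, hit, List.map_append] at hv'
    rcases List.mem_append.mp hv' with h1 | h1
    · exact hm.2.2 v' h1
    · simp only [List.map_cons, List.map_nil, List.mem_singleton] at h1
      subst h1
      exact hv

theorem pvCollect_inv_aux (ts : List String) : ∀ (m : PySem.Dict String String) (n : Int),
    n = (m.size : Int) → pvDInv m → (∀ t ∈ ts, pvGoodTok t) →
    pvDInv (pvCollect ts m n).1 ∧ m.keys ⊆ (pvCollect ts m n).1.keys := by
  induction ts with
  | nil =>
    intro m n _ hm _
    exact ⟨hm, fun a ha => ha⟩
  | cons t ts ih =>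
    intro m n hn hm hts
    unfold pvCollect
    simp only [List.foldl_cons]
    by_cases hc : (PySem.Str.isIn "e" t && ! m.contains t) = true
    · rw [if_pos hc]
      obtain ⟨h1, h2⟩ := Bool.and_eq_true_iff.mp hc
      have hcont : m.contains t = false := by simpa using h2
      have hkey : pvGoodKey t := ⟨hts t List.mem_cons_self, (pvIsIn_e t).mp h1⟩
      have hval : pvGoodVal ("t" ++ PySem.Int.toStr n) :=
        pvGoodVal_treg n (by rw [hn]; exact Int.natCast_nonneg _)
      have hm' := pvDInv_insert hm hkey hcont hval
      have hsz : n + 1 = ((m.insert t ("t" ++ PySem.Int.toStr n)).size : Int) := by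
        rw [PySem.Dict.size_insert, if_neg (by simp [hcont])]
        push_cast
        omega
      obtain ⟨ha, hb⟩ := ih _ (n + 1) hsz hm' (fun u hu => hts u (List.mem_cons_of_mem _ hu))
      refine ⟨ha, fun k hk => hb ?_⟩
      exact (PySem.Dict.mem_keys_insert _ _ _ _).mpr (Or.inr hk)
    · rw [if_neg hc]
      exact ih m n hn hm (fun u hu => hts u (List.mem_cons_of_mem _ hu))

theorem pvCollect_inv (ts : List String) (m : PySem.Dict String String) (hm : pvDInv m)
    (hts : ∀ t ∈ ts, pvGoodTok t) :
    pvDInv (pvCollect ts m (m.size : Int)).1 ∧ m.keys ⊆ (pvCollect ts m (m.size : Int)).1.keys :=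
  pvCollect_inv_aux ts m _ rfl hm hts

theorem pvJLoop_eq {m₀ : PySem.Dict String String} (hm₀ : pvDInv m₀) (ts : List String) :
    ∀ (m : PySem.Dict String String) (n : Int) (s : String) (rest : List String),
    n = (m.size : Int) → pvDInv m → m₀.keys ⊆ m.keys → '!' ∉ s.toList →
    (∀ t ∈ ts, pvGoodTok t ∧ t ∈ PySem.Str.split₀ s) →
    pvJLoop (ts.map (pvRen m₀)) ((s :: rest).map (pvT m)) n
      = ((s :: rest).map (pvT (pvCollect ts m n).1), (pvCollect ts m n).2) := by
  induction ts with
  | nil =>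
    intro m n s rest hn hm hsub hbs hts
    simp [pvJLoop, pvCollect]
  | cons t ts ih =>
    intro m n s rest hn hm hsub hbs hts
    show pvJLoop (pvRen m₀ t :: ts.map (pvRen m₀)) _ n = _
    have hcoll : pvCollect (t :: ts) m n
        = if (PySem.Str.isIn "e" t && ! m.contains t) = true then
            pvCollect ts (m.insert t ("t" ++ PySem.Int.toStr n)) (n + 1)
          else pvCollect ts m n := by
      unfold pvCollect
      simp only [List.foldl_cons]
      by_cases hc : (PySem.Str.isIn "e" t && ! m.contains t) = true
      · rw [if_pos hc, if_pos hc]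
      · rw [if_neg hc, if_neg hc]
    by_cases hk0 : t ∈ m₀.keys
    · -- already a key at line start: A sees its value (no 'e'), B sees a known key
      have hv := pvRen_mem_values hk0
      have hgv := hm₀.2.2 _ hv
      have hne : 'e' ∉ (pvRen m₀ t).toList := fun hc => (hgv.2 _ hc).2.2 rfl
      unfold pvJLoop
      rw [if_pos (by rw [pvIsIn_e_false hne]; decide)]
      have hcm : m.contains t = true :=
        (PySem.Dict.contains_iff_mem_keys m t).mpr (hsub hk0)
      rw [hcoll, if_neg (by rw [hcm]; simp)]
      exact ih m n s rest hn hm hsub hbs (fun u hu => hts u (List.mem_cons_of_mem _ hu))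
    · rw [pvRen_of_not_mem hk0]
      by_cases he : 'e' ∈ t.toList
      · have hkey : pvGoodKey t := ⟨(hts t List.mem_cons_self).1, he⟩
        unfold pvJLoop
        rw [if_neg (by rw [(pvIsIn_e t).mpr he]; decide)]
        by_cases hst : t ∈ m.keys
        · -- renamed earlier on this very line: the k-loop is a no-op
          rw [pvKLoop_stale t _ (s :: rest) m hm hkey hst 0]
          dsimp only
          rw [if_neg (by decide)]
          have hcm : m.contains t = true := (PySem.Dict.contains_iff_mem_keys m t).mpr hst
          rw [hcoll, if_neg (by rw [hcm]; simp)]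
          exact ih m n s rest hn hm hsub hbs (fun u hu => hts u (List.mem_cons_of_mem _ hu))
        · -- fresh e-token: rename it everywhere from this line on
          have hval : pvGoodVal ("t" ++ PySem.Int.toStr n) :=
            pvGoodVal_treg n (by rw [hn]; exact Int.natCast_nonneg _)
          rw [pvKLoop_fresh t _ (s :: rest) m hm hkey hst hval 0]
          rw [if_pos ⟨s, List.mem_cons_self, hbs, (hts t List.mem_cons_self).2⟩]
          dsimp only
          rw [if_pos rfl]
          have hcont : m.contains t = false := pvContains_false hst
          have hsz : n + 1 = ((m.insert t ("t" ++ PySem.Int.toStr n)).size : Int) := by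
            rw [PySem.Dict.size_insert, if_neg (by simp [hcont])]
            push_cast
            omega
          have hm' := pvDInv_insert hm hkey hcont hval
          have hsub' : m₀.keys ⊆ (m.insert t ("t" ++ PySem.Int.toStr n)).keys :=
            fun k hk => (PySem.Dict.mem_keys_insert _ _ _ _).mpr (Or.inr (hsub hk))
          rw [hcoll, if_pos (by rw [(pvIsIn_e t).mpr he, hcont]; decide)]
          exact ih _ (n + 1) s rest hsz hm' hsub' hbs
            (fun u hu => hts u (List.mem_cons_of_mem _ hu))
      · unfold pvJLoop
        rw [if_pos (by rw [pvIsIn_e_false he]; decide)]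
        rw [hcoll, if_neg (by rw [pvIsIn_e_false he]; simp)]
        exact ih m n s rest hn hm hsub hbs (fun u hu => hts u (List.mem_cons_of_mem _ hu))

theorem pvBColl_eq_collect (m : PySem.Dict String String) (n : Int) (s : String) :
    pvBColl m n s = if 2 ≤ (PySem.Str.split₀ s).length ∧
        (PySem.Str.split₀ s).any (fun t => PySem.Str.isIn "e" t && ! m.contains t) then
      pvCollect (PySem.Str.split₀ s).tail m n
    else (m, n) := rfl

theorem pvNext_eq_bColl (m : PySem.Dict String String) (s : String)
    (hb : ¬ PySem.Str.isIn "!" s = true) :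
    pvNext m s = (pvBColl m (m.size : Int) s).1 := by
  unfold pvNext
  rw [if_neg hb, pvBColl_eq_collect]
  by_cases hq : 2 ≤ (PySem.Str.split₀ s).length ∧
      (PySem.Str.split₀ s).any (fun t => PySem.Str.isIn "e" t && ! m.contains t)
  · rw [if_pos hq, if_pos hq]
  · rw [if_neg hq, if_neg hq]

theorem pvBColl_snd (m : PySem.Dict String String) (s : String) :
    (pvBColl m (m.size : Int) s).2 = ((pvBColl m (m.size : Int) s).1.size : Int) := by
  rw [pvBColl_eq_collect]
  by_cases hq : 2 ≤ (PySem.Str.split₀ s).length ∧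
      (PySem.Str.split₀ s).any (fun t => PySem.Str.isIn "e" t && ! m.contains t)
  · rw [if_pos hq]
    exact pvCollect_snd _ m
  · rw [if_neg hq]

theorem pvBLine_eq (m : PySem.Dict String String) (s : String) (hm : pvDInv m) :
    pvBLine m (m.size : Int) s = (pvT (pvNext m s) s, pvNext m s, ((pvNext m s).size : Int)) := by
  unfold pvBLine
  by_cases hb : PySem.Str.isIn "!" s = true
  · rw [if_pos hb]
    have hnext : pvNext m s = m := by unfold pvNext; rw [if_pos hb]
    have hT : pvT (pvNext m s) s = s := by
      unfold pvT
      rw [hnext, if_pos hb]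
    rw [hT, hnext]
  · rw [if_neg hb]
    rw [pvNext_eq_bColl m s hb]
    have hsnd := pvBColl_snd m s
    by_cases hq : (pvBColl m (m.size : Int) s).1.size ≠ 0 ∧ PySem.Str.isIn "e" s = true
    · rw [if_pos hq]
      have hT : pvT (pvBColl m (m.size : Int) s).1 s
          = ((PySem.Str.split₀ s).map
              (fun t => " " ++ (pvBColl m (m.size : Int) s).1.getD t t)).foldl (· ++ ·) "" := by
        unfold pvT
        rw [if_neg hb, if_pos hq]
        unfold pvRender
        rw [List.map_map]
        rfl
      rw [hT]
      refine Prod.ext_iff.mpr ⟨rfl, ?_⟩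
      exact Prod.ext_iff.mpr ⟨rfl, hsnd⟩
    · rw [if_neg hq]
      have hT : pvT (pvBColl m (m.size : Int) s).1 s = s := by
        unfold pvT
        rw [if_neg hb, if_neg hq]
      rw [hT]
      exact Prod.ext_iff.mpr ⟨rfl, Prod.ext_iff.mpr ⟨rfl, hsnd⟩⟩

theorem pvNext_inv (m : PySem.Dict String String) (s : String) (hm : pvDInv m) :
    pvDInv (pvNext m s) := by
  unfold pvNext
  by_cases hb : PySem.Str.isIn "!" s = true
  · rw [if_pos hb]; exact hm
  · rw [if_neg hb]
    by_cases hq : 2 ≤ (PySem.Str.split₀ s).length ∧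
        (PySem.Str.split₀ s).any (fun t => PySem.Str.isIn "e" t && ! m.contains t)
    · rw [if_pos hq]
      have hbs : '!' ∉ s.toList := fun hc => hb ((pvIsIn_bang s).mpr hc)
      exact (pvCollect_inv _ m hm
        (fun t ht => pvTok_good hbs (List.mem_of_mem_tail ht))).1
    · rw [if_neg hq]; exact hm

theorem pvBfold_acc (orig : List String) :
    ∀ (acc : List String) (m : PySem.Dict String String) (n : Int),
    orig.foldl pvBStep (acc, m, n)
      = (acc ++ (orig.foldl pvBStep ([], m, n)).1, (orig.foldl pvBStep ([], m, n)).2) := by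
  induction orig with
  | nil => intro acc m n; simp
  | cons s orig ih =>
    intro acc m n
    simp only [List.foldl_cons]
    have e1 : pvBStep (acc, m, n) s = (acc ++ [(pvBLine m n s).1], (pvBLine m n s).2) := rfl
    have e2 : pvBStep ([], m, n) s = ([] ++ [(pvBLine m n s).1], (pvBLine m n s).2) := rfl
    rw [e1, e2]
    have h1 := ih (acc ++ [(pvBLine m n s).1]) (pvBLine m n s).2.1 (pvBLine m n s).2.2
    have h2 := ih ([] ++ [(pvBLine m n s).1]) (pvBLine m n s).2.1 (pvBLine m n s).2.2
    simp only [Prod.mk.eta] at h1 h2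
    rw [h1, h2]
    simp

theorem pvAny_iff (m : PySem.Dict String String) (s : String) :
    ((PySem.Str.split₀ s).any (fun t => PySem.Str.isIn "e" t && ! m.contains t) = true)
      ↔ ∃ t ∈ PySem.Str.split₀ s, 'e' ∈ t.toList ∧ t ∉ m.keys := by
  rw [List.any_eq_true]
  constructor
  · rintro ⟨t, ht, hc⟩
    obtain ⟨h1, h2⟩ := Bool.and_eq_true_iff.mp hc
    refine ⟨t, ht, (pvIsIn_e t).mp h1, fun hk => ?_⟩
    have := (PySem.Dict.contains_iff_mem_keys m t).mpr hk
    simp [this] at h2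
  · rintro ⟨t, ht, he, hk⟩
    refine ⟨t, ht, ?_⟩
    rw [(pvIsIn_e t).mpr he, pvContains_false hk]
    decide

theorem pvAStep (m : PySem.Dict String String) (s : String) (rest : List String)
    (hm : pvDInv m) :
    (if PySem.Str.isIn "!" (pvT m s) then (pvT m s :: rest.map (pvT m), (m.size : Int))
     else if (PySem.Str.split₀ (pvT m s)).length < 2 then (pvT m s :: rest.map (pvT m), (m.size : Int))
     else if ! PySem.Str.isIn "e" (pvT m s) then (pvT m s :: rest.map (pvT m), (m.size : Int))
     else pvJLoop (PySem.Str.split₀ (pvT m s)).tail (pvT m s :: rest.map (pvT m)) (m.size : Int))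
    = ((s :: rest).map (pvT (pvNext m s)), ((pvNext m s).size : Int)) := by
  by_cases hbs : '!' ∈ s.toList
  · rw [if_pos (by rw [pvT_of_bang hbs]; exact (pvIsIn_bang s).mpr hbs)]
    have hnext : pvNext m s = m := by
      unfold pvNext
      rw [if_pos ((pvIsIn_bang s).mpr hbs)]
    rw [hnext, List.map_cons]
  · have hbT : ¬ PySem.Str.isIn "!" (pvT m s) = true :=
      fun hc => (pvBang_T hm hbs) ((pvIsIn_bang _).mp hc)
    have hb : ¬ PySem.Str.isIn "!" s = true := fun hc => hbs ((pvIsIn_bang s).mp hc)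
    rw [if_neg hbT, pvSplit_T hm hbs, List.length_map]
    by_cases hlen : (PySem.Str.split₀ s).length < 2
    · rw [if_pos hlen]
      have hnext : pvNext m s = m := by
        unfold pvNext
        rw [if_neg hb, if_neg (fun hc => by omega)]
      rw [hnext, List.map_cons]
    · rw [if_neg hlen]
      by_cases heT : 'e' ∈ (pvT m s).toList
      · rw [if_neg (by rw [(pvIsIn_e (pvT m s)).mpr heT]; decide)]
        rw [← List.map_tail]
        have hnext : pvNext m s = (pvCollect (PySem.Str.split₀ s).tail m (m.size : Int)).1 := by
          unfold pvNext
          rw [if_neg hb,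
            if_pos ⟨by omega, (pvAny_iff m s).mpr ((pvE_T hm hbs).mp heT)⟩]
        have := pvJLoop_eq hm ((PySem.Str.split₀ s).tail) m (m.size : Int) s rest rfl hm
          (fun a ha => ha) hbs
          (fun t ht => ⟨pvTok_good hbs (List.mem_of_mem_tail ht), List.mem_of_mem_tail ht⟩)
        rw [List.map_cons] at this
        rw [this, hnext, pvCollect_snd]
      · rw [if_pos (by rw [pvIsIn_e_false heT]; decide)]
        have hnext : pvNext m s = m := by
          unfold pvNext
          rw [if_neg hb, if_neg (fun hc => heT ((pvE_T hm hbs).mpr ((pvAny_iff m s).mp hc.2)))]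
        rw [hnext, List.map_cons]

theorem pvILoop_cons (s : String) (rest : List String) (n : Int) (s' : String)
    (rest' : List String) (n' : Int)
    (hp : (if PySem.Str.isIn "!" s then (s :: rest, n)
      else if (PySem.Str.split₀ s).length < 2 then (s :: rest, n)
      else if ! PySem.Str.isIn "e" s then (s :: rest, n)
      else pvJLoop (PySem.Str.split₀ s).tail (s :: rest) n) = (s' :: rest', n')) :
    pvILoop (s :: rest) n = (s' :: (pvILoop rest' n').1, (pvILoop rest' n').2) := by
  rw [pvILoop]
  split
  next ns n2 heq =>
    rw [hp] at heq
    injection heq with he1 he2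
    subst he1
    subst he2
    rfl

theorem pvMain (orig : List String) : ∀ m : PySem.Dict String String, pvDInv m →
    pvILoop (orig.map (pvT m)) (m.size : Int)
      = ((orig.foldl pvBStep ([], m, (m.size : Int))).1,
         (orig.foldl pvBStep ([], m, (m.size : Int))).2.2) := by
  induction orig with
  | nil => intro m hm; simp [pvILoop]
  | cons s rest ih =>
    intro m hm
    rw [List.map_cons]
    have hstepA := pvAStep m s rest hm
    rw [List.map_cons] at hstepA
    rw [pvILoop_cons _ _ _ _ _ _ hstepA]
    rw [ih (pvNext m s) (pvNext_inv m s hm)]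
    rw [List.foldl_cons]
    have hstep : pvBStep ([], m, (m.size : Int)) s
        = ([pvT (pvNext m s) s], pvNext m s, ((pvNext m s).size : Int)) := by
      unfold pvBStep
      rw [pvBLine_eq m s hm]
      rfl
    rw [hstep, pvBfold_acc rest [pvT (pvNext m s) s] (pvNext m s) ((pvNext m s).size : Int)]
    dsimp only
    rw [List.singleton_append]

-- ===== VERDICT (by name: the statement is the Claim_ definition above) =====
theorem regs_rename_spec : Claim_equal_regs_rename := by
  intro line _
  unfold Spec_regs_rename regs_rename regs_rename_alt
  have hfun : pvT PySem.Dict.empty = id := by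
    funext s
    unfold pvT
    split_ifs with h1 h2
    · rfl
    · exact absurd h2.1 (by simp [PySem.Dict.size, PySem.Dict.empty])
    · rfl
  have hid : line.map (pvT PySem.Dict.empty) = line := by rw [hfun, List.map_id]
  have h := pvMain line PySem.Dict.empty (by
    constructor
    · simp [PySem.Dict.keys, PySem.Dict.empty]
    · constructor <;> simp [PySem.Dict.keys, PySem.Dict.values, PySem.Dict.empty])
  rw [hid] at h
  simpa [pvBStep] using h
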